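-- pv_equiv track=rewrite | github.com/frndlynbrhdpm/my-python-code | numbers_with_given_sum.py | num_with_given_sum
-- ===== SOURCE A (Python) =====
-- def num_with_given_sum(A,s):
-- 	# mid = len(A)//2
-- 	result=[]
--
-- 	for i in range(len(A)):
-- 		for j in range(i+1,len(A)):
-- 			if abs(s-A[i])==A[j]:
-- 				result.append(A[i])
-- 				result.append(A[j])
--
-- 	# Below logic wouldn't work if one number falls in smaller range and the 2nd number is on teh other side
-- 	# if abs(s-A[mid])<A[mid]:
-- 	# 	for i in range(mid):
-- 	# 		for j in range(i+1,mid):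
-- 	# 			if abs(s-A[i])==A[j]:
-- 	# 				result.append(A[i])
-- 	# 				result.append(A[j])
-- 	# else:
-- 	# 	for i in range(mid,len(A)):
-- 	# 		for j in range(mid+1,len(A)):
-- 	# 			if abs(s-A[i])==A[j]:
-- 	# 				result.append(A[i])
-- 	# 				result.append(A[j])
-- 	return result
-- ===== SOURCE B (Python) =====
-- def num_with_given_sum(A, s):
--     positions = {}
--     for j, v in enumerate(A):
--         positions.setdefault(v, []).append(j)
--     result = []
--     for i, x in enumerate(A):
--         t = abs(s - x)
--         for j in positions.get(t, []):
--             if j > i: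
--                 result.append(x)
--                 result.append(t)
--     return result
-- ===== Notes on version B (the rewrite author's own statement) =====
-- stated objective: faster
-- what changed: B replaces A's nested index scan by a one-pass hash index from value to its ascending list of indices, then for each i looks up the single target abs(s-A[i]) and emits the pairs for indices greater than i.
import Mathlib
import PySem

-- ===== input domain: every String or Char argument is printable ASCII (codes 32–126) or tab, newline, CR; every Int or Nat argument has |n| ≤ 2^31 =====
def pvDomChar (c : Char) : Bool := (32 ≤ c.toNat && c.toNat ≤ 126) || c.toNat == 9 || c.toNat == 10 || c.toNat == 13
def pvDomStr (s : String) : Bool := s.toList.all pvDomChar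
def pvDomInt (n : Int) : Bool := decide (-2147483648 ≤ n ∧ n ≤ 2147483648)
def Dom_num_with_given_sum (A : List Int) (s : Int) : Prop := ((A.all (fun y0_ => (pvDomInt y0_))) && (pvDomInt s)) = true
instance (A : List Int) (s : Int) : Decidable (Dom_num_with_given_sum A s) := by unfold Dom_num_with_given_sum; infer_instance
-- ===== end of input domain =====

-- B replaces A's nested index scan by a one-pass dict from value to its ascending index list,
-- then per i looks up the single target abs(s-A[i]) and emits pairs for bucket indices > i.

-- ===== PORT A =====
def num_with_given_sum (A : List Int) (s : Int) : List Int :=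
  (PySem.List.pyRange 0 (A.length : Int) 1).foldl (fun result i =>
    (PySem.List.pyRange (i + 1) (A.length : Int) 1).foldl (fun result j =>
      if |s - PySem.List.pyGetD A i 0| = PySem.List.pyGetD A j 0 then
        result ++ [PySem.List.pyGetD A i 0, PySem.List.pyGetD A j 0]
      else result) result) []

-- ===== PORT B =====
def num_with_given_sum_alt (A : List Int) (s : Int) : List Int :=
  let positions : PySem.Dict Int (List Int) :=
    (PySem.List.enumerate A).foldl
      (fun d p => d.modify p.2 [] (fun l => l ++ [p.1])) PySem.Dict.empty
  (PySem.List.enumerate A).foldl (fun result p =>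
    let t := |s - p.2|
    (positions.getD t []).foldl (fun r j =>
      if j > p.1 then r ++ [p.2, t] else r) result) []

-- ===== PRECONDITION & SPEC =====
def Spec_num_with_given_sum (A : List Int) (s : Int) (out : List Int) : Prop := out = num_with_given_sum_alt A s
instance (A : List Int) (s : Int) (out : List Int) : Decidable (Spec_num_with_given_sum A s out) := by unfold Spec_num_with_given_sum; infer_instance

-- ===== CLAIM (what is proved, stated in full; the proofs are below) =====
def Claim_equal_num_with_given_sum : Prop := ∀ (A : List Int) (s : Int), Dom_num_with_given_sum A s → Spec_num_with_given_sum A s (num_with_given_sum A s)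

-- ===== LEMMAS AND PROOFS =====

-- indexing a cons by a positive Python index steps into the tail
theorem pv_getD_cons (a : Int) (l : List Int) (i : Int) (h : 1 ≤ i) :
    PySem.List.pyGetD (a :: l) i 0 = PySem.List.pyGetD l (i - 1) 0 := by
  simp only [PySem.List.pyGetD, PySem.List.pyGet?, PySem.List.pyIdx?, List.length_cons]
  rw [if_pos (by omega : (0:Int) ≤ i), if_pos (by omega : (0:Int) ≤ i - 1)]
  by_cases h2 : i < ((l.length : Int) + 1)
  · rw [if_pos (by push_cast; omega), if_pos (by omega)]
    simp only [Option.bind_some]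
    have hn : i.toNat = (i-1).toNat + 1 := by omega
    rw [hn, List.getElem?_cons_succ]
  · rw [if_neg (by push_cast; omega), if_neg (by omega)]
    rfl

-- enumerate as an index loop over range with pyGetD lookups (any start)
theorem pv_enum_eq (A : List Int) (s : Int) :
    PySem.List.enumerate A s
      = (PySem.List.pyRange s (s + A.length) 1).map (fun i => (i, PySem.List.pyGetD A (i - s) 0)) := by
  induction A generalizing s with
  | nil => simp [PySem.List.enumerate_nil, PySem.List.pyRange_one_eq_nil]
  | cons a l ih =>
    rw [PySem.List.enumerate_cons, PySem.List.pyRange_one_cons (by simp)]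
    simp only [List.map_cons, sub_self]
    congr 1
    · simp [PySem.List.pyGetD, PySem.List.pyGet?, PySem.List.pyIdx?]
    · have hb : s + ((a :: l).length : Int) = (s + 1) + (l.length : Int) := by
        simp [List.length_cons]; ring
      rw [hb, ih (s+1)]
      apply List.map_congr_left
      intro i hi
      rw [PySem.List.mem_pyRange_one] at hi
      rw [pv_getD_cons a l (i - s) (by omega)]
      congr 2
      omega

-- the positions dict of B: the bucket of t holds exactly the ascending indices of value t
theorem pv_positions (A : List Int) (t : Int) :
    (((PySem.List.enumerate A).foldl
        (fun d p => d.modify p.2 [] (fun l => l ++ [p.1])) PySem.Dict.empty).getD t [])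
      = (((PySem.List.enumerate A).filter (fun p => p.2 == t)).map (·.1)) := by
  have h : (PySem.List.enumerate A).foldl
        (fun d p => d.modify p.2 [] (fun l => l ++ [p.1])) PySem.Dict.empty
      = (((PySem.List.enumerate A).map Prod.swap).foldl
        (fun d p => d.modify p.1 [] (fun l => l ++ [p.2])) PySem.Dict.empty) := by
    rw [List.foldl_map]; simp
  rw [h, PySem.Dict.getD_foldl_modify_append]
  simp [List.filter_map, Function.comp_def, Prod.swap]

-- 'if cond: out += e' loop as a flatMap
theorem pv_foldl_if_append {α β : Type} (l : List α) (c : α → Prop) [DecidablePred c]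
    (e : α → List β) (acc : List β) :
    l.foldl (fun r x => if c x then r ++ e x else r) acc
      = acc ++ l.flatMap (fun x => if c x then e x else []) := by
  have h : (fun (r : List β) x => if c x then r ++ e x else r)
      = fun r x => r ++ (if c x then e x else []) := by
    funext r x; split <;> simp
  rw [h, PySem.List.foldl_append_eq_flatMap]

theorem pv_flatMap_filter {α β : Type} (l : List α) (p : α → Bool) (g : α → List β) :
    (l.filter p).flatMap g = l.flatMap (fun x => if p x then g x else []) := by
  induction l with
  | nil => simp
  | cons a t ih => by_cases h : p a <;> simp [h, ih]

theorem pv_flatMap_congr {α β : Type} (l : List α) (g g' : α → List β)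
    (h : ∀ x ∈ l, g x = g' x) : l.flatMap g = l.flatMap g' := by
  simp only [List.flatMap_def]; rw [List.map_congr_left h]

theorem pv_main (A : List Int) (s : Int) :
    num_with_given_sum A s = num_with_given_sum_alt A s := by
  unfold num_with_given_sum num_with_given_sum_alt
  simp only [pv_positions]
  simp only [pv_foldl_if_append]
  simp only [pv_enum_eq A 0, zero_add, sub_zero, List.filter_map]
  simp only [PySem.List.foldl_append_eq_flatMap, List.nil_append, List.flatMap_map,
    Function.comp_def]
  apply pv_flatMap_congr
  intro i hi
  rw [PySem.List.mem_pyRange_one] at hi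
  rw [pv_flatMap_filter,
    PySem.List.pyRange_one_append 0 (i+1) (A.length : Int) (by omega) (by omega),
    List.flatMap_append]
  have h0 : (PySem.List.pyRange 0 (i+1) 1).flatMap
      (fun j => if PySem.List.pyGetD A j 0 == |s - PySem.List.pyGetD A i 0| then
        (if j > i then [PySem.List.pyGetD A i 0, |s - PySem.List.pyGetD A i 0|] else []) else []) = [] := by
    apply List.flatMap_eq_nil_iff.mpr
    intro j hj
    rw [PySem.List.mem_pyRange_one] at hj
    have hji : ¬ (j > i) := by omega
    simp [hji]
  rw [h0, List.nil_append]
  apply pv_flatMap_congr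
  intro j hj
  rw [PySem.List.mem_pyRange_one] at hj
  have hji : j > i := by omega
  by_cases h : PySem.List.pyGetD A j 0 = |s - PySem.List.pyGetD A i 0|
  · simp [hji, h]
  · simp [h, Ne.symm h]

-- ===== VERDICT (by name: the statement is the Claim_ definition above) =====
theorem num_with_given_sum_spec : Claim_equal_num_with_given_sum := by
  intro A s _
  unfold Spec_num_with_given_sum
  exact pv_main A s
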